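-- pv_equiv track=rewrite | github.com/joajfreitas/dotfiles | bin/bin/keybindings.py | find_mod_key
-- ===== SOURCE A (Python) =====
-- def find_mod_key(config):
--     """ Find mod key to use """
--     mod = "Super"
--     for setting in config:
--         setting = setting.split()
--         if len(setting) < 3:
--             continue
--         if setting[0] == "set":
--             if setting[1] == "$mod":
--                 if setting[2] == "Mod4":
--                     mod = "Super"
--                 elif setting[2] == "Mod1":
--                     mod = "Alt"
--
--     return mod
-- ===== SOURCE B (Python) =====
-- def find_mod_key(config):
--     """ Find mod key to use """
--     for setting in reversed(list(config)):
--         tokens = setting.split()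
--         if len(tokens) >= 3 and tokens[0] == "set" and tokens[1] == "$mod":
--             if tokens[2] == "Mod4":
--                 return "Super"
--             if tokens[2] == "Mod1":
--                 return "Alt"
--     return "Super"
-- ===== Notes on version B (the rewrite author's own statement) =====
-- stated objective: alternative
-- what changed: Replaces the forward loop that keeps overwriting an accumulator with a reverse scan that returns at the first effective 'set $mod' directive (the last one in forward order).
import Mathlib
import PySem

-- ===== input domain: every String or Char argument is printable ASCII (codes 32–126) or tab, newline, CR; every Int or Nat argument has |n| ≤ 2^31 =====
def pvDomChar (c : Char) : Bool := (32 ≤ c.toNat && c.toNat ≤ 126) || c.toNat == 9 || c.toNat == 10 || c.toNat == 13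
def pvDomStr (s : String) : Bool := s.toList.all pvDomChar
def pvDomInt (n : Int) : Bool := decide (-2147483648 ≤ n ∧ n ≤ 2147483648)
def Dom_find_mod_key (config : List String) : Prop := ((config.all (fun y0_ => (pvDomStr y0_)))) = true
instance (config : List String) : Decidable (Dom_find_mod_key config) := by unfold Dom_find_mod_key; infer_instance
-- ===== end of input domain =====

-- B replaces A's forward accumulator-overwrite loop with a reverse scan returning at the first match (alternative decomposition, same cost).


-- ===== PORT A =====
-- forward loop: 'mod' accumulator overwritten by each 'set $mod Mod4/Mod1' line
def find_mod_key (config : List String) : String :=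
  config.foldl (fun mod setting =>
    let t := PySem.Str.split₀ setting
    if t.length < 3 then mod
    else if t.getD 0 "" = "set" then
      if t.getD 1 "" = "$mod" then
        if t.getD 2 "" = "Mod4" then "Super"
        else if t.getD 2 "" = "Mod1" then "Alt"
        else mod
      else mod
    else mod) "Super"

-- ===== PORT B =====
-- reverse scan with early return at the first effective directive
def find_mod_key_altGo : List String → String
  | [] => "Super"
  | setting :: rest =>
    let t := PySem.Str.split₀ setting
    if 3 ≤ t.length ∧ t.getD 0 "" = "set" ∧ t.getD 1 "" = "$mod" then
      if t.getD 2 "" = "Mod4" then "Super"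
      else if t.getD 2 "" = "Mod1" then "Alt"
      else find_mod_key_altGo rest
    else find_mod_key_altGo rest

def find_mod_key_alt (config : List String) : String :=
  find_mod_key_altGo config.reverse

-- ===== PRECONDITION & SPEC =====
def Spec_find_mod_key (config : List String) (out : String) : Prop := out = find_mod_key_alt config
instance (config : List String) (out : String) : Decidable (Spec_find_mod_key config out) := by unfold Spec_find_mod_key; infer_instance

-- ===== CLAIM (what is proved, stated in full; the proofs are below) =====
def Claim_equal_find_mod_key : Prop := ∀ (config : List String), Dom_find_mod_key config → Spec_find_mod_key config (find_mod_key config)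

-- ===== LEMMAS AND PROOFS =====

-- classification of one line: some v iff the line sets the mod key to v
def pvClassify (setting : String) : Option String :=
  let t := PySem.Str.split₀ setting
  if 3 ≤ t.length ∧ t.getD 0 "" = "set" ∧ t.getD 1 "" = "$mod" then
    if t.getD 2 "" = "Mod4" then some "Super"
    else if t.getD 2 "" = "Mod1" then some "Alt"
    else none
  else none

-- first classification hit in a list
def pvFirstHit : List String → Option String
  | [] => none
  | l :: r => match pvClassify l with
    | some v => some v
    | none => pvFirstHit r

theorem stepA_eq (mod setting : String) :
    (let t := PySem.Str.split₀ setting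
     if t.length < 3 then mod
     else if t.getD 0 "" = "set" then
       if t.getD 1 "" = "$mod" then
         if t.getD 2 "" = "Mod4" then "Super"
         else if t.getD 2 "" = "Mod1" then "Alt"
         else mod
       else mod
     else mod) = (pvClassify setting).getD mod := by
  simp only [pvClassify]
  split_ifs <;> simp_all <;> omega

theorem altGo_eq (ys : List String) :
    find_mod_key_altGo ys = (pvFirstHit ys).getD "Super" := by
  induction ys with
  | nil => rfl
  | cons l r ih =>
    simp only [find_mod_key_altGo, pvFirstHit, pvClassify]
    split_ifs <;> simp_all

theorem firstHit_snoc (ys : List String) (x : String) :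
    pvFirstHit (ys ++ [x]) =
      match pvFirstHit ys with
      | some v => some v
      | none => pvClassify x := by
  induction ys with
  | nil =>
    simp only [List.nil_append, pvFirstHit]
    cases pvClassify x <;> rfl
  | cons l r ih =>
    simp only [List.cons_append, pvFirstHit, ih]
    cases pvClassify l <;> rfl

theorem foldA_eq (xs : List String) (mod : String) :
    xs.foldl (fun mod setting =>
      let t := PySem.Str.split₀ setting
      if t.length < 3 then mod
      else if t.getD 0 "" = "set" then
        if t.getD 1 "" = "$mod" then
          if t.getD 2 "" = "Mod4" then "Super"
          else if t.getD 2 "" = "Mod1" then "Alt"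
          else mod
        else mod
      else mod) mod = (pvFirstHit xs.reverse).getD mod := by
  induction xs generalizing mod with
  | nil => rfl
  | cons x xs ih =>
    simp only [List.foldl_cons, ih, List.reverse_cons, firstHit_snoc]
    cases h : pvFirstHit xs.reverse
    · simpa using stepA_eq mod x
    · simp

-- ===== VERDICT (by name: the statement is the Claim_ definition above) =====
theorem find_mod_key_spec : Claim_equal_find_mod_key := by
  intro config _
  show find_mod_key config = find_mod_key_alt config
  simp only [find_mod_key, find_mod_key_alt, foldA_eq, altGo_eq]
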